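-- pv_equiv track=rewrite | github.com/WangChun98/EREI | response_with_emojis.py | instead_punc
-- ===== SOURCE A (Python) =====
-- import string
--
-- punc = string.punctuation
--
-- def instead_punc(out, current_emoji_list):
--     punc_list = []
--     for index, item in enumerate(out.split()):
--         if item in punc:
--             punc_list.append(index)
--             continue
--
--     out_list = out.split()
--     if len(punc_list) != 0:
--         if len(out_list) <= len(current_emoji_list):
--             for index, item_o in enumerate(out_list):
--                 if index in punc_list:
--                     out_list[index] = current_emoji_list[index]
--         if len(out_list) > len(current_emoji_list):
--             for i in range(0, len(current_emoji_list)):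
--                 if i in punc_list:
--                     out_list[i] = current_emoji_list[i]
--             for i in range(len(current_emoji_list), len(out_list)):
--                 if i in punc_list:
--                     out_list[i] = current_emoji_list[-1]
--     else:
--         out_list.append(current_emoji_list[-1])
--     new_out = ' '.join(out_list)
--     return new_out
-- ===== SOURCE B (Python) =====
-- import string
--
-- punc = string.punctuation
--
-- def instead_punc(out, current_emoji_list):
--     # Single pass over the tokens: replace each punctuation token in place,
--     # tracking with a flag whether any was seen; no separate index list.
--     result = []
--     has_punc = False
--     for index, item in enumerate(out.split()):
--         if item in punc:
--             has_punc = True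
--             result.append(current_emoji_list[index]
--                           if index < len(current_emoji_list)
--                           else current_emoji_list[-1])
--         else:
--             result.append(item)
--     if not has_punc:
--         result.append(current_emoji_list[-1])
--     return ' '.join(result)
-- ===== Notes on version B (the rewrite author's own statement) =====
-- stated objective: simpler
-- what changed: B replaces A's three separate passes (index-collection pass plus two length-cased replacement loops) by one enumerate loop with a has_punc flag and a single per-token replacement rule.
import Mathlib
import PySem

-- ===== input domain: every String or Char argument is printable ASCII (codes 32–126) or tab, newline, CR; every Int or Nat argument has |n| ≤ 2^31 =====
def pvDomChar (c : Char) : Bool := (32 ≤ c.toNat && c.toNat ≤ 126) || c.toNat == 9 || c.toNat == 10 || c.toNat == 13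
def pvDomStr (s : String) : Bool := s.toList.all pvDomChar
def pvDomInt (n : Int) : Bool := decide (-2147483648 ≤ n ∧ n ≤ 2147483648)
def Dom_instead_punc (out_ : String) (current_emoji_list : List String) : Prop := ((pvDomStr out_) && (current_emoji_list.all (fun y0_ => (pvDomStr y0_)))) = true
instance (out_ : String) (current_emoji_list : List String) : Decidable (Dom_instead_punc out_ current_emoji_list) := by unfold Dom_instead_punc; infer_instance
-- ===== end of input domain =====

-- B replaces A's three passes (index collection + two length-cased replacement loops) by one
-- enumerate loop with a has_punc flag and a single per-token rule; objective: simpler.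

-- string.punctuation
def pvPunc : String := "!\"#$%&'()*+,-./:;<=>?@[\\]^_`{|}~"

-- ===== PORT A =====
def instead_punc (out_ : String) (current_emoji_list : List String) : String :=
  let punc_list : List Int :=
    (PySem.List.enumerate (PySem.Str.split₀ out_)).foldl
      (fun acc p => if PySem.Str.isIn p.2 pvPunc then acc ++ [p.1] else acc) []
  let out_list := PySem.Str.split₀ out_
  let out_list :=
    if PySem.List.len punc_list ≠ 0 then
      let out_list :=
        if PySem.List.len out_list ≤ PySem.List.len current_emoji_list then
          (PySem.List.enumerate out_list).foldl
            (fun l p => if p.1 ∈ punc_list then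
                l.set p.1.toNat (PySem.List.pyGetD current_emoji_list p.1 "") else l)
            out_list
        else out_list
      if PySem.List.len out_list > PySem.List.len current_emoji_list then
        let out_list :=
          (PySem.List.pyRange 0 (PySem.List.len current_emoji_list)).foldl
            (fun l i => if i ∈ punc_list then
                l.set i.toNat (PySem.List.pyGetD current_emoji_list i "") else l)
            out_list
        (PySem.List.pyRange (PySem.List.len current_emoji_list) (PySem.List.len out_list)).foldl
          (fun l i => if i ∈ punc_list then
              l.set i.toNat (PySem.List.pyGetD current_emoji_list (-1) "") else l)
          out_list
      else out_list
    else out_list ++ [PySem.List.pyGetD current_emoji_list (-1) ""]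
  PySem.Str.join " " out_list

-- ===== PORT B =====
def instead_punc_alt (out_ : String) (current_emoji_list : List String) : String :=
  let st :=
    (PySem.List.enumerate (PySem.Str.split₀ out_)).foldl
      (fun st p =>
        if PySem.Str.isIn p.2 pvPunc then
          (st.1 ++ [if p.1 < PySem.List.len current_emoji_list then
                      PySem.List.pyGetD current_emoji_list p.1 ""
                    else PySem.List.pyGetD current_emoji_list (-1) ""], true)
        else (st.1 ++ [p.2], st.2))
      (([] : List String), false)
  let result := if st.2 = false then st.1 ++ [PySem.List.pyGetD current_emoji_list (-1) ""] else st.1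
  PySem.Str.join " " result

-- ===== PRECONDITION & SPEC =====
-- Pre_ excludes exactly the inputs where the Python A raises IndexError (current_emoji_list[-1]
-- on an empty list); B raises there too.
def Pre_instead_punc (out_ : String) (current_emoji_list : List String) : Prop :=
  current_emoji_list ≠ []
instance (out_ : String) (current_emoji_list : List String) : Decidable (Pre_instead_punc out_ current_emoji_list) := by unfold Pre_instead_punc; infer_instance
def pvWitness_instead_punc : String × List String := ("hello , world", ["E1", "E2"])

def Spec_instead_punc (out_ : String) (current_emoji_list : List String) (out : String) : Prop := out = instead_punc_alt out_ current_emoji_list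
instance (out_ : String) (current_emoji_list : List String) (out : String) : Decidable (Spec_instead_punc out_ current_emoji_list out) := by unfold Spec_instead_punc; infer_instance

-- ===== CLAIM (what is proved, stated in full; the proofs are below) =====
def Claim_equal_instead_punc : Prop := ∀ (out_ : String) (current_emoji_list : List String), Dom_instead_punc out_ current_emoji_list → Pre_instead_punc out_ current_emoji_list → Spec_instead_punc out_ current_emoji_list (instead_punc out_ current_emoji_list)

-- ===== LEMMAS AND PROOFS =====

-- B's per-token value
def pvF (cel : List String) (i : Int) (t : String) : String :=
  if PySem.Str.isIn t pvPunc then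
    (if i < PySem.List.len cel then PySem.List.pyGetD cel i ""
     else PySem.List.pyGetD cel (-1) "")
  else t

-- A's punc_list, in closed form
def pvPlist (ts : List String) : List Int :=
  ((PySem.List.enumerate ts 0).filter (fun p => PySem.Str.isIn p.2 pvPunc)).map (fun p => p.1)

lemma plist_eq (ts : List String) :
    (PySem.List.enumerate ts 0).foldl
      (fun acc p => if PySem.Str.isIn p.2 pvPunc then acc ++ [p.1] else acc) []
    = pvPlist ts := by
  simpa [pvPlist] using
    PySem.List.foldl_append_if (fun p : Int × String => PySem.Str.isIn p.2 pvPunc)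
      (fun p => p.1) (PySem.List.enumerate ts 0) []

lemma mem_plist (ts : List String) (j : Nat) (hj : j < ts.length) :
    ((j : Int) ∈ pvPlist ts) ↔ PySem.Str.isIn ts[j] pvPunc = true := by
  simp only [pvPlist, List.mem_map, List.mem_filter, PySem.List.mem_enumerate_iff]
  constructor
  · rintro ⟨p, ⟨⟨k, hk, rfl⟩, hP⟩, hfst⟩
    have hkj : k = j := by simp at hfst; omega
    subst hkj
    exact hP
  · intro hP
    exact ⟨((j : Int), ts[j]), ⟨⟨j, hj, by simp⟩, hP⟩, rfl⟩

lemma plist_nil_iff (ts : List String) :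
    pvPlist ts = [] ↔ ts.any (fun t => PySem.Str.isIn t pvPunc) = false := by
  simp only [pvPlist, List.map_eq_nil_iff, List.filter_eq_nil_iff, PySem.List.mem_enumerate_iff,
    List.any_eq_false]
  constructor
  · intro h t ht
    obtain ⟨k, hk, rfl⟩ := List.mem_iff_getElem.1 ht
    exact h _ ⟨k, hk, rfl⟩
  · rintro h p ⟨k, hk, rfl⟩
    exact h _ (List.getElem_mem hk)

lemma map_pvF_id (cel : List String) :
    ∀ (ts : List String) (s : Int),
      ts.any (fun t => PySem.Str.isIn t pvPunc) = false →
      (PySem.List.enumerate ts s).map (fun p => pvF cel p.1 p.2) = ts := by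
  intro ts
  induction ts with
  | nil => intro s _; simp [PySem.List.enumerate_nil]
  | cons t ts ih =>
    intro s h
    simp only [List.any_cons, Bool.or_eq_false_iff] at h
    rw [PySem.List.enumerate_cons, List.map_cons, ih _ h.2]
    simp [pvF, h.1, -PySem.Str.isIn_eq]

-- B's fold, characterised
lemma bfold (cel : List String) :
    ∀ (ts : List String) (s : Int) (acc : List String) (b : Bool),
      (PySem.List.enumerate ts s).foldl
        (fun st p =>
          if PySem.Str.isIn p.2 pvPunc then
            (st.1 ++ [if p.1 < PySem.List.len cel then
                        PySem.List.pyGetD cel p.1 ""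
                      else PySem.List.pyGetD cel (-1) ""], true)
          else (st.1 ++ [p.2], st.2)) (acc, b)
      = (acc ++ (PySem.List.enumerate ts s).map (fun p => pvF cel p.1 p.2),
         b || ts.any (fun t => PySem.Str.isIn t pvPunc)) := by
  intro ts
  induction ts with
  | nil => intro s acc b; simp [PySem.List.enumerate_nil]
  | cons t ts ih =>
    intro s acc b
    rw [PySem.List.enumerate_cons]
    by_cases h : PySem.Str.isIn t pvPunc = true
    · simp [h, ih, pvF, -PySem.Str.isIn_eq, -PySem.List.len_eq]
    · simp [h, ih, pvF, -PySem.Str.isIn_eq, -PySem.List.len_eq]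

-- set-fold: length is preserved
lemma setfold_length (C : Int → Prop) [DecidablePred C] (w : Int → String) :
    ∀ (idxs : List Int) (l : List String),
      (idxs.foldl (fun l i => if C i then l.set i.toNat (w i) else l) l).length = l.length := by
  intro idxs
  induction idxs with
  | nil => intro l; rfl
  | cons i rest ih =>
    intro l
    simp only [List.foldl_cons]
    rw [ih]
    split_ifs <;> simp

-- set-fold: pointwise description (indices nonnegative, value depends only on the index)
lemma setfold_getElem? (C : Int → Prop) [DecidablePred C] (w : Int → String) :
    ∀ (idxs : List Int), (∀ i ∈ idxs, 0 ≤ i) →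
      ∀ (l : List String) (j : Nat),
      (idxs.foldl (fun l i => if C i then l.set i.toNat (w i) else l) l)[j]?
        = if (j : Int) ∈ idxs ∧ C (j : Int) ∧ j < l.length then some (w (j : Int)) else l[j]? := by
  intro idxs
  induction idxs with
  | nil => intro _ l j; simp
  | cons i rest ih =>
    intro hnn l j
    have h0 : (0 : Int) ≤ i := hnn i (List.mem_cons_self ..)
    simp only [List.foldl_cons]
    rw [ih (fun x hx => hnn x (List.mem_cons_of_mem _ hx))]
    have hlen : (if C i then l.set i.toNat (w i) else l).length = l.length := by
      split_ifs <;> simp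
    rw [hlen]
    have hget : (if C i then l.set i.toNat (w i) else l)[j]?
        = if i = (j : Int) ∧ C i ∧ j < l.length then some (w i) else l[j]? := by
      by_cases hC : C i
      · rw [if_pos hC, List.getElem?_set]
        by_cases hij : i = (j : Int)
        · have htn : i.toNat = j := by omega
          by_cases hjl : j < l.length
          · have hC' : C ((j : Nat) : Int) := hij ▸ hC
            simp [hij, hC', hjl]
          · simp [hij, hjl]
        · have htn : ¬ i.toNat = j := by omega
          simp [htn, hij]
      · rw [if_neg hC]
        simp [hC]
    rw [hget]
    simp only [List.mem_cons]
    by_cases hij : i = (j : Int)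
    · subst hij
      by_cases hC2 : C ((j : Nat) : Int) <;> by_cases hjl : j < l.length <;>
        by_cases hr : ((j : Nat) : Int) ∈ rest <;> simp_all
    · have hij' : ¬ (j : Int) = i := fun h => hij h.symm
      simp [hij, hij']

-- fold over enumerate where only the index is used = fold over the index range
lemma afold_enum (pl : List Int) (v : Int → String) :
    ∀ (ts : List String) (s : Int) (l : List String),
      (PySem.List.enumerate ts s).foldl
        (fun l p => if p.1 ∈ pl then l.set p.1.toNat (v p.1) else l) l
      = (PySem.List.pyRange s (s + ts.length)).foldl
          (fun l i => if i ∈ pl then l.set i.toNat (v i) else l) l := by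
  intro ts s l
  rw [← PySem.List.map_fst_enumerate ts s, List.foldl_map]

-- ===== VERDICT (by name: the statement is the Claim_ definition above) =====
theorem instead_punc_spec : Claim_equal_instead_punc := by
  intro out_ cel _ _
  unfold Spec_instead_punc instead_punc instead_punc_alt
  rw [bfold cel (PySem.Str.split₀ out_) 0 [] false, plist_eq]
  set ts := PySem.Str.split₀ out_ with hts
  simp only [List.nil_append, Bool.false_or, PySem.List.len_eq]
  by_cases hA : ts.any (fun t => PySem.Str.isIn t pvPunc) = true
  · -- at least one punctuation token: A replaces in place, B's flag is set
    have hApos : ((pvPlist ts).length : Int) ≠ 0 := by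
      have hne : pvPlist ts ≠ [] := fun h => by rw [plist_nil_iff, hA] at h; cases h
      simpa using hne
    have hBneg : ¬ ((ts.any fun t => PySem.Str.isIn t pvPunc) = false) := by
      rw [hA]; simp
    rw [if_pos hApos, if_neg hBneg]
    refine congrArg (PySem.Str.join " ") ?_
    by_cases hle : (ts.length : Int) ≤ (cel.length : Int)
    · -- branch len(out_list) <= len(current_emoji_list)
      rw [if_pos hle,
        afold_enum (pvPlist ts) (fun i => PySem.List.pyGetD cel i "") ts 0 ts,
        setfold_length (fun i => i ∈ pvPlist ts) (fun i => PySem.List.pyGetD cel i "")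
          (PySem.List.pyRange 0 (0 + (ts.length : Int))) ts,
        if_neg (show ¬ ((ts.length : Int) > (cel.length : Int)) by omega)]
      refine List.ext_getElem? fun j => ?_
      rw [setfold_getElem? (fun i => i ∈ pvPlist ts) (fun i => PySem.List.pyGetD cel i "")
        (PySem.List.pyRange 0 (0 + (ts.length : Int)))
        (fun i hi => (PySem.List.mem_pyRange_one.1 hi).1) ts j]
      by_cases hj : j < ts.length
      · simp only [List.getElem?_map, PySem.List.getElem?_enumerate,
          List.getElem?_eq_getElem hj, Option.map_some]
        by_cases hP : PySem.Str.isIn ts[j] pvPunc = true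
        · rw [if_pos ⟨PySem.List.mem_pyRange_one.2 ⟨by omega, by omega⟩,
            (mem_plist ts j hj).2 hP, hj⟩]
          simp only [pvF, zero_add, PySem.List.len_eq]
          rw [if_pos hP, if_pos (show ((j : Nat) : Int) < (cel.length : Int) by omega)]
        · rw [if_neg (fun h => hP ((mem_plist ts j hj).1 h.2.1))]
          simp only [pvF, zero_add, PySem.List.len_eq]
          rw [if_neg hP]
      · have h1 : ts[j]? = none := List.getElem?_eq_none (by omega)
        have h2 : ((PySem.List.enumerate ts 0).map (fun p => pvF cel p.1 p.2))[j]? = none :=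
          List.getElem?_eq_none (by simp [PySem.List.length_enumerate]; omega)
        rw [if_neg (fun h => hj h.2.2), h1, h2]
    · -- branch len(out_list) > len(current_emoji_list): two range loops
      rw [if_neg hle,
        if_pos (show (ts.length : Int) > (cel.length : Int) by omega),
        setfold_length (fun i => i ∈ pvPlist ts) (fun i => PySem.List.pyGetD cel i "")
          (PySem.List.pyRange 0 (cel.length : Int)) ts]
      refine List.ext_getElem? fun j => ?_
      rw [setfold_getElem? (fun i => i ∈ pvPlist ts) (fun _ => PySem.List.pyGetD cel (-1) "")
          (PySem.List.pyRange (cel.length : Int) (ts.length : Int))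
          (fun i hi => by have := PySem.List.mem_pyRange_one.1 hi; omega),
        setfold_length (fun i => i ∈ pvPlist ts) (fun i => PySem.List.pyGetD cel i "")
          (PySem.List.pyRange 0 (cel.length : Int)) ts,
        setfold_getElem? (fun i => i ∈ pvPlist ts) (fun i => PySem.List.pyGetD cel i "")
          (PySem.List.pyRange 0 (cel.length : Int))
          (fun i hi => (PySem.List.mem_pyRange_one.1 hi).1) ts j]
      by_cases hj : j < ts.length
      · simp only [List.getElem?_map, PySem.List.getElem?_enumerate,
          List.getElem?_eq_getElem hj, Option.map_some]
        by_cases hP : PySem.Str.isIn ts[j] pvPunc = true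
        · by_cases hjc : j < cel.length
          · rw [if_neg (fun h => by have := PySem.List.mem_pyRange_one.1 h.1; omega),
              if_pos ⟨PySem.List.mem_pyRange_one.2 ⟨by omega, by omega⟩,
                (mem_plist ts j hj).2 hP, hj⟩]
            simp only [pvF, zero_add, PySem.List.len_eq]
            rw [if_pos hP, if_pos (show ((j : Nat) : Int) < (cel.length : Int) by omega)]
          · rw [if_pos ⟨PySem.List.mem_pyRange_one.2 ⟨by omega, by omega⟩,
              (mem_plist ts j hj).2 hP, hj⟩]
            simp only [pvF, zero_add, PySem.List.len_eq]
            rw [if_pos hP, if_neg (show ¬ ((j : Nat) : Int) < (cel.length : Int) by omega)]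
        · rw [if_neg (fun h => hP ((mem_plist ts j hj).1 h.2.1)),
            if_neg (fun h => hP ((mem_plist ts j hj).1 h.2.1))]
          simp only [pvF, zero_add, PySem.List.len_eq]
          rw [if_neg hP]
      · have h1 : ts[j]? = none := List.getElem?_eq_none (by omega)
        have h2 : ((PySem.List.enumerate ts 0).map (fun p => pvF cel p.1 p.2))[j]? = none :=
          List.getElem?_eq_none (by simp [PySem.List.length_enumerate]; omega)
        rw [if_neg (fun h => hj h.2.2), if_neg (fun h => hj h.2.2), h1, h2]
  · -- no punctuation token: both append current_emoji_list[-1]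
    have hA' : ts.any (fun t => PySem.Str.isIn t pvPunc) = false := by
      simpa using hA
    have hnil : pvPlist ts = [] := (plist_nil_iff ts).2 hA'
    rw [if_neg (show ¬ (((pvPlist ts).length : Int) ≠ 0) by rw [hnil]; simp),
      if_pos hA', map_pvF_id cel ts 0 hA']
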